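-- pv_equiv track=rewrite | github.com/Trollermaner/jac-schedule-data | scripts/pdfToJSON.py | setIntensive
-- ===== SOURCE A (Python) =====
-- def setIntensive(line):
--     passed = False
--     stringLine = []
--     for word in line:
--         if word == "Intensive" or word == "intensive":
--             passed = True
--             stringLine.append(word)
--
--         elif passed:
--             stringLine.append(word)
--
--     stringLine = " ".join(stringLine)
--     return stringLine
-- ===== SOURCE B (Python) =====
-- def setIntensive(line):
--     idxs = [line.index(w) for w in ("Intensive", "intensive") if w in line]
--     if not idxs:
--         return ""
--     return " ".join(line[min(idxs):])
-- ===== Notes on version B (the rewrite author's own statement) =====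
-- stated objective: idiomatic
-- what changed: Instead of a boolean-flag accumulator pass, B locates the first sentinel by taking the minimum of list.index over the sentinels that are present and returns the joined slice from that position (empty string if neither occurs).
import Mathlib
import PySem

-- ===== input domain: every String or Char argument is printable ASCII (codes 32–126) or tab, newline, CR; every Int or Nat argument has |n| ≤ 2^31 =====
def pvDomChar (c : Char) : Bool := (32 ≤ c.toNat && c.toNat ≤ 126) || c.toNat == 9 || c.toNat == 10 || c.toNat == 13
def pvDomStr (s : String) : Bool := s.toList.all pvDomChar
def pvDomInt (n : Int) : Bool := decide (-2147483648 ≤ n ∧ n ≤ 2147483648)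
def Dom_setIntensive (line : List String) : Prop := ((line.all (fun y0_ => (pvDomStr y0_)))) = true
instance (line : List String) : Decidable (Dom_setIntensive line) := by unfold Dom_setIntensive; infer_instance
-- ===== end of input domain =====

-- B replaces A's boolean-flag accumulator pass by index-then-slice: min of list.index over the
-- sentinels present gives the cut point, and the slice from there is joined (idiomatic decomposition).

-- ===== PORT A =====
def setIntensiveStep (s : Bool × List String) (word : String) : Bool × List String :=
  if word = "Intensive" ∨ word = "intensive" then (true, s.2 ++ [word])
  else if s.1 then (s.1, s.2 ++ [word])
  else s

def setIntensive (line : List String) : String :=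
  let st := line.foldl setIntensiveStep (false, [])
  PySem.Str.join " " st.2

-- ===== PORT B =====
def setIntensive_alt (line : List String) : String :=
  -- idxs = [line.index(w) for w in ("Intensive", "intensive") if w in line]
  -- (index is applied only to members, so index? is always some; getD 0 is never the default)
  let idxs := ((["Intensive", "intensive"]).filter (fun w => line.contains w)).map
      (fun w => (PySem.List.index? line w).getD 0)
  match PySem.List.min? idxs (fun x => x) with
  | none => ""
  | some i => PySem.Str.join " " (PySem.List.slice line (some (i : Int)) none)

-- ===== PRECONDITION & SPEC =====
def Spec_setIntensive (line : List String) (out : String) : Prop := out = setIntensive_alt line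
instance (line : List String) (out : String) : Decidable (Spec_setIntensive line out) := by unfold Spec_setIntensive; infer_instance

-- ===== CLAIM (what is proved, stated in full; the proofs are below) =====
def Claim_equal_setIntensive : Prop := ∀ (line : List String), Dom_setIntensive line → Spec_setIntensive line (setIntensive line)

-- ===== LEMMAS AND PROOFS =====
def pvP (w : String) : Bool := w ≠ "Intensive" && w ≠ "intensive"

-- A side: the fold accumulates exactly the dropWhile suffix.
theorem setIntensive_foldl_true (l : List String) (acc : List String) :
    l.foldl setIntensiveStep (true, acc) = (true, acc ++ l) := by
  induction l generalizing acc with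
  | nil => simp
  | cons w t ih =>
      simp only [List.foldl_cons, setIntensiveStep]
      split_ifs <;> simp [ih]

theorem setIntensive_foldl_false (l : List String) (acc : List String) :
    (l.foldl setIntensiveStep (false, acc)).2 = acc ++ l.dropWhile pvP := by
  induction l generalizing acc with
  | nil => simp
  | cons w t ih =>
      simp only [List.foldl_cons, setIntensiveStep]
      by_cases h : w = "Intensive" ∨ w = "intensive"
      · rcases h with rfl | rfl <;> simp [setIntensive_foldl_true, pvP]
      · have h1 : ¬ w = "Intensive" := fun e => h (Or.inl e)
        have h2 : ¬ w = "intensive" := fun e => h (Or.inr e)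
        simp [h1, h2, ih, pvP]

-- if everything before m satisfies p and position m refutes it, dropWhile p = drop m
theorem pvDropWhile_eq_drop {α : Type} (p : α → Bool) (l : List α) (m : Nat)
    (hm : m < l.length)
    (hbefore : ∀ j (hj : j < m), p (l[j]'(Nat.lt_trans hj hm)) = true)
    (hat : p (l[m]'hm) = false) :
    l.dropWhile p = l.drop m := by
  induction l generalizing m with
  | nil => simp at hm
  | cons x t ih =>
      cases m with
      | zero =>
          have hx : p x = false := hat
          simp [List.dropWhile_cons, hx]
      | succ m' =>
          have hx : p x = true := hbefore 0 (Nat.succ_pos _)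
          simp only [List.dropWhile_cons, hx, if_true, List.drop_succ_cons]
          exact ih m' (by simpa using hm)
            (fun j hj => hbefore (j + 1) (by omega)) (by simpa using hat)

theorem setIntensive_alt_eq (l : List String) :
    setIntensive_alt l = PySem.Str.join " " (l.dropWhile pvP) := by
  by_cases m1 : "Intensive" ∈ l <;> by_cases m2 : "intensive" ∈ l
  all_goals
    simp only [setIntensive_alt, List.filter_cons, List.filter_nil,
      List.elem_eq_contains.symm, List.elem_iff, m1, m2, if_true, if_false,
      decide_true, decide_false, List.map_cons, List.map_nil]
  · -- both sentinels present
    obtain ⟨a, ha⟩ := Option.isSome_iff_exists.1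
      ((PySem.List.index?_isSome_iff (xs := l) (v := "Intensive")).2 m1)
    obtain ⟨b, hb⟩ := Option.isSome_iff_exists.1
      ((PySem.List.index?_isSome_iff (xs := l) (v := "intensive")).2 m2)
    obtain ⟨hka, hla, hmina⟩ := PySem.List.getElem_of_index?_eq_some ha
    obtain ⟨hkb, hlb, hminb⟩ := PySem.List.getElem_of_index?_eq_some hb
    rw [ha, hb]
    simp only [Option.getD_some, PySem.List.min?_id_cons, List.foldl]
    rw [PySem.List.slice_from_natCast]
    have hm : min a b < l.length := by omega
    rw [pvDropWhile_eq_drop pvP l (min a b) hm ?_ ?_]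
    · intro j hj
      have h1 : l[j]'(Nat.lt_trans hj hm) ≠ "Intensive" := hmina j (by omega)
      have h2 : l[j]'(Nat.lt_trans hj hm) ≠ "intensive" := hminb j (by omega)
      simp [pvP, h1, h2]
    · rcases Nat.le_total a b with hab | hab
      · have : min a b = a := by omega
        simp only [this]; simp [pvP, hla]
      · have : min a b = b := by omega
        simp only [this]; simp [pvP, hlb]
  · -- only "Intensive" present
    obtain ⟨a, ha⟩ := Option.isSome_iff_exists.1
      ((PySem.List.index?_isSome_iff (xs := l) (v := "Intensive")).2 m1)
    obtain ⟨hka, hla, hmina⟩ := PySem.List.getElem_of_index?_eq_some ha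
    rw [ha]
    simp only [Option.getD_some, PySem.List.min?_id_cons, List.foldl]
    rw [PySem.List.slice_from_natCast]
    rw [pvDropWhile_eq_drop pvP l a hka ?_ ?_]
    · intro j hj
      have h1 : l[j]'(Nat.lt_trans hj hka) ≠ "Intensive" := hmina j hj
      have h2 : l[j]'(Nat.lt_trans hj hka) ≠ "intensive" := fun e => m2 (e ▸ List.getElem_mem _)
      simp [pvP, h1, h2]
    · simp [pvP, hla]
  · -- only "intensive" present
    obtain ⟨b, hb⟩ := Option.isSome_iff_exists.1
      ((PySem.List.index?_isSome_iff (xs := l) (v := "intensive")).2 m2)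
    obtain ⟨hkb, hlb, hminb⟩ := PySem.List.getElem_of_index?_eq_some hb
    rw [hb]
    simp only [Option.getD_some, PySem.List.min?_id_cons, List.foldl]
    rw [PySem.List.slice_from_natCast]
    rw [pvDropWhile_eq_drop pvP l b hkb ?_ ?_]
    · intro j hj
      have h1 : l[j]'(Nat.lt_trans hj hkb) ≠ "Intensive" := fun e => m1 (e ▸ List.getElem_mem _)
      have h2 : l[j]'(Nat.lt_trans hj hkb) ≠ "intensive" := hminb j hj
      simp [pvP, h1, h2]
    · simp [pvP, hlb]
  · -- neither present: min? [] = none, and dropWhile drops everything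
    have hall : l.dropWhile pvP = [] := by
      rw [List.dropWhile_eq_nil_iff]
      intro x hx
      have h1 : x ≠ "Intensive" := fun e => m1 (e ▸ hx)
      have h2 : x ≠ "intensive" := fun e => m2 (e ▸ hx)
      simp [pvP, h1, h2]
    simp [hall, PySem.List.min?, PySem.Str.join, PySem.Chars.join, List.intercalate]

-- ===== VERDICT (by name: the statement is the Claim_ definition above) =====
theorem setIntensive_spec : Claim_equal_setIntensive := by
  intro line _
  unfold Spec_setIntensive setIntensive
  simp [setIntensive_foldl_false, setIntensive_alt_eq]
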